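-- pv_equiv track=rewrite | github.com/belablotski/heap | top_n.py | top_n_v2
-- ===== SOURCE A (Python) =====
-- class NSet(object):
--     def __init__(self, size):
--         self.data = set()
--         self.size = size
--
--     def add(self, value):
--         self.data.add(value)
--         if len(self.data) > self.size:
--             self.data.remove(min(self.data))
--
--     def to_sorted_list(self, reverse=True):
--         return sorted(self.data, reverse=reverse)
--
-- def top_n_v2(data, n):
--     """
--     Return the top n elements from the data list (without sorting).
--
--     :param data: List of elements
--     :param n: Number of top elements to return
--     :return: List of top n elements
--     """
--     if not isinstance(data, list):
--         raise ValueError("Data must be a list.")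
--
--     if not isinstance(n, int) or n < 0:
--         raise ValueError("n must be a non-negative integer.")
--
--     max_elements = NSet(n)
--
--     for d in data:
--         max_elements.add(d)
--
--     return max_elements.to_sorted_list(reverse=True)
-- ===== SOURCE B (Python) =====
-- def top_n_v2(data, n):
--     """Return the top n distinct elements of data, sorted descending."""
--     if not isinstance(data, list):
--         raise ValueError("Data must be a list.")
--
--     if not isinstance(n, int) or n < 0:
--         raise ValueError("n must be a non-negative integer.")
--
--     return sorted(set(data), reverse=True)[:n]
-- ===== Notes on version B (the rewrite author's own statement) =====
-- stated objective: simpler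
-- what changed: B replaces A's bounded-set eviction loop (add each element, then rescan the whole set for its minimum and remove it whenever the set exceeds n) with a single dedupe of the input, one descending sort, and a slice of the first n.
import Mathlib
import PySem

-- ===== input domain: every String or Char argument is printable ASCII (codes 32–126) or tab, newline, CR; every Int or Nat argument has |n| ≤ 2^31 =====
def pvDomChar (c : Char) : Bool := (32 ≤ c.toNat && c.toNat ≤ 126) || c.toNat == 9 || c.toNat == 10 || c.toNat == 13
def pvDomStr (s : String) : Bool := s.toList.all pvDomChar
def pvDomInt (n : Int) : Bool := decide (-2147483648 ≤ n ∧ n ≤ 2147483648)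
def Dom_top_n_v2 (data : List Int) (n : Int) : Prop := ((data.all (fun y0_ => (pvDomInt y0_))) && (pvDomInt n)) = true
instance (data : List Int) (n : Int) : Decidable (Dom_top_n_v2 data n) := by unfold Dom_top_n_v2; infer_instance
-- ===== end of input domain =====

-- B replaces A's bounded-set eviction loop by "dedupe, sort descending once, take the first n" (simpler; same results, proved below).


-- ===== PORT A =====
-- NSet.add: self.data.add(value); if len(self.data) > self.size: self.data.remove(min(self.data))
def pvNSetAdd (size : Int) (s : PySem.Set Int) (value : Int) : PySem.Set Int :=
  let s' := PySem.Set.add s value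
  if size < (s'.length : Int) then
    match PySem.List.min? s' (fun x => x) with   -- min(self.data); s' is nonempty here, so min? is some
    | some m => PySem.Set.discard s' m           -- set.remove(m): m ∈ s', so remove = discard
    | none => s'                                 -- unreachable (min() of an empty set would raise)
  else s'

def top_n_v2 (data : List Int) (n : Int) : List Int :=
  if n < 0 then []   -- A raises ValueError here; excluded by Pre_top_n_v2
  else
    -- max_elements = NSet(n); for d in data: max_elements.add(d); return sorted(set, reverse=True)
    PySem.List.sorted (data.foldl (pvNSetAdd n) PySem.Set.empty) (fun x => x) true

-- ===== PORT B =====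
def top_n_v2_alt (data : List Int) (n : Int) : List Int :=
  if n < 0 then []   -- same ValueError guard; excluded by Pre_top_n_v2
  else PySem.List.slice (PySem.List.sorted (PySem.Set.ofList data) (fun x => x) true) none (some n)

-- ===== PRECONDITION & SPEC =====
-- A raises ValueError for n < 0 (isinstance guard); that is the only raising input under the type convention.
def Pre_top_n_v2 (data : List Int) (n : Int) : Prop := 0 ≤ n
instance (data : List Int) (n : Int) : Decidable (Pre_top_n_v2 data n) := by unfold Pre_top_n_v2; infer_instance
def pvWitness_top_n_v2 : List Int × Int := ([3, 1, 2, 1], 2)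

def Spec_top_n_v2 (data : List Int) (n : Int) (out : List Int) : Prop := out = top_n_v2_alt data n
instance (data : List Int) (n : Int) (out : List Int) : Decidable (Spec_top_n_v2 data n out) := by unfold Spec_top_n_v2; infer_instance

-- ===== CLAIM (what is proved, stated in full; the proofs are below) =====
def Claim_equal_top_n_v2 : Prop := ∀ (data : List Int) (n : Int), Dom_top_n_v2 data n → Pre_top_n_v2 data n → Spec_top_n_v2 data n (top_n_v2 data n)

-- ===== LEMMAS AND PROOFS =====

-- Insertion of d into a strictly descending list (no-op if present); proof-side mirror of Set.add under sorting.
def insDesc (d : Int) : List Int → List Int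
  | [] => [d]
  | x :: xs => if x < d then d :: x :: xs else if d = x then x :: xs else x :: insDesc d xs

lemma mem_insDesc (d y : Int) (M : List Int) : y ∈ insDesc d M ↔ y = d ∨ y ∈ M := by
  induction M with
  | nil => simp [insDesc]
  | cons x xs ih =>
    simp only [insDesc]
    split_ifs with h1 h2
    · simp
    · subst h2; simp
    · simp [ih]; tauto

lemma insDesc_pairwise (d : Int) (M : List Int) (hM : M.Pairwise (· > ·)) :
    (insDesc d M).Pairwise (· > ·) := by
  induction M with
  | nil => simp [insDesc]
  | cons x xs ih =>
    rw [List.pairwise_cons] at hM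
    simp only [insDesc]
    split_ifs with h1 h2
    · refine List.pairwise_cons.mpr ⟨?_, List.pairwise_cons.mpr ⟨hM.1, hM.2⟩⟩
      intro y hy
      rcases List.mem_cons.mp hy with rfl | hy
      · omega
      · have := hM.1 y hy; omega
    · exact List.pairwise_cons.mpr ⟨hM.1, hM.2⟩
    · refine List.pairwise_cons.mpr ⟨?_, ih hM.2⟩
      intro y hy
      rcases (mem_insDesc d y xs).mp hy with rfl | hy
      · omega
      · exact hM.1 y hy

lemma insDesc_of_mem (d : Int) (M : List Int) (hM : M.Pairwise (· > ·)) (hd : d ∈ M) :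
    insDesc d M = M := by
  induction M with
  | nil => simp at hd
  | cons x xs ih =>
    rw [List.pairwise_cons] at hM
    rcases List.mem_cons.mp hd with rfl | hd
    · simp [insDesc]
    · have hxd : x > d := hM.1 d hd
      simp only [insDesc]
      rw [if_neg (by omega), if_neg (by omega), ih hM.2 hd]

lemma insDesc_perm_of_not_mem (d : Int) (M : List Int) (hd : d ∉ M) :
    (insDesc d M).Perm (M ++ [d]) := by
  induction M with
  | nil => simp [insDesc]
  | cons x xs ih =>
    simp only [List.mem_cons, not_or] at hd
    simp only [insDesc]
    split_ifs with h1 h2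
    · exact (List.perm_append_singleton d (x :: xs)).symm
    · exact absurd h2 hd.1
    · exact List.Perm.cons x (ih hd.2)

-- take k ∘ insDesc d commutes with pre-truncation to k elements (the crux: evicting early loses nothing).
lemma take_insDesc_take (d : Int) (L : List Int) : ∀ (k : Nat),
    ((insDesc d (L.take k)).take k) = (insDesc d L).take k := by
  induction L with
  | nil => intro k; simp
  | cons x xs ih =>
    intro k
    cases k with
    | zero => simp
    | succ j =>
      simp only [List.take_succ_cons, insDesc]
      split_ifs with h1 h2
      · cases j with
        | zero => simp
        | succ i =>
          simp only [List.take_succ_cons, List.take_take]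
          have hmin : min i (i + 1) = i := by omega
          rw [hmin]
      · simp [List.take_take]
      · simp only [List.take_succ_cons, ih j]

-- sorted(s, reverse=True) of a Nodup list is its unique strictly descending rearrangement
lemma sortedDesc_eq (s M : List Int) (hperm : M.Perm s) (hM : M.Pairwise (· > ·)) :
    PySem.List.sorted s (fun x => x) true = M :=
  PySem.List.sorted_rev_eq_of_perm_of_pairwise_gt s M (fun x => x) hperm hM

lemma sortedDesc_pairwise (s : List Int) (hs : s.Nodup) :
    (PySem.List.sorted s (fun x => x) true).Pairwise (· > ·) := by
  have h1 := PySem.List.sorted_pairwise_rev s (fun x => x)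
  have h2 : (PySem.List.sorted s (fun x => x) true).Nodup :=
    (PySem.List.sorted_perm s (fun x => x) true).nodup_iff.mpr hs
  exact (h1.and h2).imp (by intro a b ⟨hle, hne⟩; omega)

lemma sortedDesc_perm (s : List Int) : (PySem.List.sorted s (fun x => x) true).Perm s :=
  PySem.List.sorted_perm s (fun x => x) true

-- Set.add under descending sort is insDesc
lemma sortedDesc_add (s : List Int) (hs : s.Nodup) (d : Int) :
    PySem.List.sorted (PySem.Set.add s d) (fun x => x) true
      = insDesc d (PySem.List.sorted s (fun x => x) true) := by
  set M := PySem.List.sorted s (fun x => x) true with hMdef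
  have hMp : M.Pairwise (· > ·) := sortedDesc_pairwise s hs
  have hMperm : M.Perm s := sortedDesc_perm s
  by_cases hd : d ∈ s
  · rw [PySem.Set.add_of_mem hd, ← hMdef, insDesc_of_mem d M hMp (hMperm.mem_iff.mpr hd)]
  · rw [PySem.Set.add_of_not_mem hd]
    refine sortedDesc_eq _ _ ?_ (insDesc_pairwise d M hMp)
    exact (insDesc_perm_of_not_mem d M (fun h => hd (hMperm.subset h))).trans
      (hMperm.append_right [d])

-- a strictly descending list with a global minimum m ends in m
lemma desc_eq_dropLast_append_min (N : List Int) (m : Int) (hN : N.Pairwise (· > ·))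
    (hm : m ∈ N) (hmin : ∀ y ∈ N, m ≤ y) : ∃ L, N = L ++ [m] ∧ m ∉ L := by
  induction N with
  | nil => simp at hm
  | cons x xs ih =>
    rw [List.pairwise_cons] at hN
    cases xs with
    | nil =>
      simp only [List.mem_cons, List.not_mem_nil, or_false] at hm
      exact ⟨[], by simp [hm], by simp⟩
    | cons y t =>
      have hxy : x > y := hN.1 y (by simp)
      have hmx : m ∈ y :: t := by
        rcases List.mem_cons.mp hm with rfl | h
        · exact absurd (hmin y (by simp)) (by omega)
        · exact h
      obtain ⟨L, hL, hmL⟩ := ih hN.2 hmx (fun z hz => hmin z (List.mem_cons_of_mem x hz))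
      refine ⟨x :: L, by simp [hL], ?_⟩
      have : x > m := hN.1 m hmx
      simp only [List.mem_cons, not_or]
      exact ⟨by omega, hmL⟩

lemma step_nodup (n : Int) (s : PySem.Set Int) (d : Int) (hs : s.Nodup) :
    (pvNSetAdd n s d).Nodup := by
  unfold pvNSetAdd
  simp only []
  split_ifs with h
  · split
    · exact PySem.Set.nodup_discard _ _ (PySem.Set.nodup_add s d hs)
    · exact PySem.Set.nodup_add s d hs
  · exact PySem.Set.nodup_add s d hs

-- one NSet.add step, viewed through descending sort
lemma stepSorted (n : Int) (hn : 0 ≤ n) (s : List Int) (hs : s.Nodup)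
    (hlen : (s.length : Int) ≤ n) (d : Int) :
    PySem.List.sorted (pvNSetAdd n s d) (fun x => x) true
      = (insDesc d (PySem.List.sorted s (fun x => x) true)).take n.toNat := by
  set M := PySem.List.sorted s (fun x => x) true with hMdef
  have hs' : (PySem.Set.add s d).Nodup := PySem.Set.nodup_add s d hs
  have hsortAdd : PySem.List.sorted (PySem.Set.add s d) (fun x => x) true = insDesc d M :=
    sortedDesc_add s hs d
  have hNperm : (insDesc d M).Perm (PySem.Set.add s d) := by
    rw [← hsortAdd]; exact sortedDesc_perm _
  have hNlen : (insDesc d M).length = (PySem.Set.add s d).length := hNperm.length_eq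
  have hNp : (insDesc d M).Pairwise (· > ·) := insDesc_pairwise d M (sortedDesc_pairwise s hs)
  unfold pvNSetAdd
  simp only []
  by_cases hbig : n < ((PySem.Set.add s d).length : Int)
  · rw [if_pos hbig]
    -- eviction: the set has exactly n.toNat + 1 elements
    have hlenAdd : (PySem.Set.add s d).length ≤ s.length + 1 := by
      rw [PySem.Set.add_eq_ite]; split_ifs <;> simp
    have hlenN : (insDesc d M).length = n.toNat + 1 := by omega
    have hne : PySem.Set.add s d ≠ [] := by
      intro h; rw [h] at hbig; simp at hbig; omega
    obtain ⟨m, hm⟩ : ∃ m, PySem.List.min? (PySem.Set.add s d) (fun x => x) = some m := by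
      cases hmin : PySem.List.min? (PySem.Set.add s d) (fun x => x) with
      | none => exact absurd ((PySem.List.min?_eq_none_iff _ _).mp hmin) hne
      | some m => exact ⟨m, rfl⟩
    rw [hm]
    have hmmem : m ∈ insDesc d M := hNperm.mem_iff.mpr (PySem.List.min?_mem hm)
    have hmmin : ∀ y ∈ insDesc d M, m ≤ y := fun y hy =>
      PySem.List.min?_isMin hm y (hNperm.subset hy)
    obtain ⟨L, hL, hmL⟩ := desc_eq_dropLast_append_min (insDesc d M) m hNp hmmem hmmin
    have hLlen : L.length = n.toNat := by
      have := congrArg List.length hL; simp at this; omega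
    -- sorted (discard …) = L
    have hdperm : (PySem.Set.discard (PySem.Set.add s d) m).Perm L := by
      have hnodupN : (insDesc d M).Nodup := hNperm.nodup_iff.mpr hs'
      apply (List.perm_ext_iff_of_nodup (PySem.Set.nodup_discard _ m hs') ?_).mpr
      · intro y
        rw [PySem.Set.mem_discard]
        constructor
        · rintro ⟨hy, hyne⟩
          have : y ∈ insDesc d M := hNperm.mem_iff.mpr hy
          rw [hL] at this
          rcases List.mem_append.mp this with h | h
          · exact h
          · simp at h; exact absurd h hyne
        · intro hy
          refine ⟨hNperm.mem_iff.mp (by rw [hL]; exact List.mem_append_left _ hy), ?_⟩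
          rintro rfl; exact hmL hy
      · rw [hL] at hnodupN
        exact (List.nodup_append.mp hnodupN).1
    have hLp : L.Pairwise (· > ·) := by
      rw [hL] at hNp
      exact (List.pairwise_append.mp hNp).1
    rw [sortedDesc_eq _ L hdperm.symm hLp, hL, ← hLlen, List.take_left]
  · rw [if_neg hbig]
    rw [hsortAdd, List.take_of_length_le]
    omega

-- loop invariant over the whole fold
lemma fold_invariant (n : Int) (hn : 0 ≤ n) (data : List Int) :
    (data.foldl (pvNSetAdd n) PySem.Set.empty).Nodup ∧
    ((data.foldl (pvNSetAdd n) PySem.Set.empty).length : Int) ≤ n ∧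
    PySem.List.sorted (data.foldl (pvNSetAdd n) PySem.Set.empty) (fun x => x) true
      = (PySem.List.sorted (PySem.Set.ofList data) (fun x => x) true).take n.toNat := by
  induction data using List.reverseRecOn with
  | nil => refine ⟨List.nodup_nil, by simp; omega, by simp [PySem.List.sorted, PySem.Set.ofList, PySem.Set.empty]⟩
  | append_singleton data d ih =>
    obtain ⟨hnd, hlen, hsort⟩ := ih
    rw [List.foldl_append]
    simp only [List.foldl_cons, List.foldl_nil]
    set S := data.foldl (pvNSetAdd n) PySem.Set.empty with hSdef
    have hstep := stepSorted n hn S hnd hlen d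
    have hsortNew :
        PySem.List.sorted (pvNSetAdd n S d) (fun x => x) true
          = (PySem.List.sorted (PySem.Set.ofList (data ++ [d])) (fun x => x) true).take n.toNat := by
      rw [hstep, hsort, take_insDesc_take, PySem.Set.ofList_append_singleton,
        sortedDesc_add (PySem.Set.ofList data) (PySem.Set.nodup_ofList data) d]
    refine ⟨step_nodup n S d hnd, ?_, hsortNew⟩
    · -- length bound via the sorted list's length
      have hl : (pvNSetAdd n S d).length
          = ((PySem.List.sorted (PySem.Set.ofList (data ++ [d])) (fun x => x) true).take n.toNat).length := by
        rw [← hsortNew, PySem.List.length_sorted]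
      rw [hl]
      have := List.length_take_le n.toNat (PySem.List.sorted (PySem.Set.ofList (data ++ [d])) (fun x => x) true)
      omega

-- ===== VERDICT (by name: the statement is the Claim_ definition above) =====
theorem top_n_v2_spec : Claim_equal_top_n_v2 := by
  intro data n _ hpre
  unfold Spec_top_n_v2 top_n_v2 top_n_v2_alt
  have hn : ¬ n < 0 := by unfold Pre_top_n_v2 at hpre; omega
  rw [if_neg hn, if_neg hn, PySem.List.slice_to _ (by omega)]
  exact (fold_invariant n (by omega) data).2.2
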